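-- pv_equiv track=rewrite | github.com/khafizov-v/statuses | src/report_generator.py | _organize_commits_by_author
-- ===== SOURCE A (Python) =====
-- from typing import Dict, List, Any
--
-- def _organize_commits_by_author(commits_data: Dict) -> Dict[str, List[Dict]]:
--     """Organize commits by author across all repositories"""
--     commits_by_author = {}
--
--     for repo, commits in commits_data.items():
--         for commit in commits:
--             author = commit["author"]
--             if author not in commits_by_author:
--                 commits_by_author[author] = []
--             commits_by_author[author].append(commit)
--
--     # Sort commits by date for each author
--     for author in commits_by_author:
--         commits_by_author[author].sort(key=lambda x: x["date"], reverse=True)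
--
--     return commits_by_author
-- ===== SOURCE B (Python) =====
-- def _organize_commits_by_author(commits_data):
--     """One-pass grouping with ordered insertion: each commit is placed directly
--     at its date-descending position in its author's list, so no sort phase is
--     needed afterwards."""
--     commits_by_author = {}
--     for commits in commits_data.values():
--         for commit in commits:
--             lst = commits_by_author.setdefault(commit["author"], [])
--             date = commit["date"]
--             i = 0
--             while i < len(lst) and lst[i]["date"] >= date:
--                 i += 1
--             lst.insert(i, commit)
--     return commits_by_author
-- ===== Notes on version B (the rewrite author's own statement) =====
-- stated objective: alternative
-- what changed: A groups commits per author and then runs a separate per-author reverse sort pass; B does a single grouping pass that places each commit directly at its date-descending position in its author's list (ordered insertion, stable for equal dates), so the sort phase disappears.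
import Mathlib
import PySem

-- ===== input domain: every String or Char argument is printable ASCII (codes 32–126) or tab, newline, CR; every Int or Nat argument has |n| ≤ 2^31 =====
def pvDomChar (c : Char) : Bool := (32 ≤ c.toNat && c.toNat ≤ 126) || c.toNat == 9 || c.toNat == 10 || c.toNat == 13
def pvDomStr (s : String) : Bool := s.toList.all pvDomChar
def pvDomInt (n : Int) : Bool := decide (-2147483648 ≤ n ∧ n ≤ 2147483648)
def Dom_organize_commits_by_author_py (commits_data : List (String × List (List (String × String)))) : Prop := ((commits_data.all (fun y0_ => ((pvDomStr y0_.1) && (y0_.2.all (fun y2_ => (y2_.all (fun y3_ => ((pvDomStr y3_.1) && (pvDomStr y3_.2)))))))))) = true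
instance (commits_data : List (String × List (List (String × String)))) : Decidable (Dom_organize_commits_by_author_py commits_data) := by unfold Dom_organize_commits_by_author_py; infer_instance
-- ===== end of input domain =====

-- B replaces A's group-then-sort-each-list two-phase algorithm by a single grouping pass
-- that places every commit directly at its date-descending position in its author's list
-- (ordered insertion), so no separate sort phase remains; same return value.

-- commit["author"] / commit["date"] (exact on Pre_, which guarantees both keys are present)
def pvAuthor (c : List (String × String)) : String := (PySem.Dict.mk c).getD "author" ""
def pvDate (c : List (String × String)) : String := (PySem.Dict.mk c).getD "date" ""

-- ===== PORT A =====
def organize_commits_by_author_py (commits_data : List (String × List (List (String × String)))) : List (String × List (List (String × String))) :=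
  -- for repo, commits in commits_data.items(): for commit in commits: group by author
  let grouped : PySem.Dict String (List (List (String × String))) :=
    commits_data.foldl (fun d rc =>
      rc.2.foldl (fun d c =>
        let a := pvAuthor c
        -- if author not in commits_by_author: commits_by_author[author] = []
        let d' := if d.contains a then d else d.insert a ([] : List (List (String × String)))
        -- commits_by_author[author].append(commit)
        d'.modify a [] (fun l => l ++ [c])) d) PySem.Dict.empty
  -- for author in commits_by_author: commits_by_author[author].sort(key=..., reverse=True)
  (grouped.keys.foldl (fun d a =>
      d.modify a [] (fun l => PySem.List.sorted l pvDate true)) grouped).items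

-- ===== PORT B =====
-- the while-loop of Source B: scan past entries with date >= new date, insert there
def pvInsortDesc (date : String) (c : List (String × String)) : List (List (String × String)) → List (List (String × String))
  | [] => [c]
  | x :: t => if date ≤ pvDate x then x :: pvInsortDesc date c t else c :: x :: t

def organize_commits_by_author_py_alt (commits_data : List (String × List (List (String × String)))) : List (String × List (List (String × String))) :=
  (commits_data.foldl (fun d rc =>
    rc.2.foldl (fun d c =>
      -- lst = commits_by_author.setdefault(commit["author"], []); lst.insert(i, commit)
      d.insert (pvAuthor c) (pvInsortDesc (pvDate c) c (d.getD (pvAuthor c) []))) d)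
    (PySem.Dict.empty : PySem.Dict String (List (List (String × String))))).items

-- ===== PRECONDITION & SPEC =====
-- Pre_ excludes exactly the inputs on which the Python A raises KeyError: a commit dict
-- missing the "author" or the "date" key.
def Pre_organize_commits_by_author_py (commits_data : List (String × List (List (String × String)))) : Prop :=
  ∀ rc ∈ commits_data, ∀ c ∈ rc.2,
    (PySem.Dict.mk c).contains "author" = true ∧ (PySem.Dict.mk c).contains "date" = true
instance (commits_data : List (String × List (List (String × String)))) : Decidable (Pre_organize_commits_by_author_py commits_data) := by unfold Pre_organize_commits_by_author_py; infer_instance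

def pvWitness_organize_commits_by_author_py : (List (String × List (List (String × String)))) :=
  [("repo1", [[("author", "ann"), ("date", "2024-01-02")], [("author", "bob"), ("date", "2024-01-01")]])]

def Spec_organize_commits_by_author_py (commits_data : List (String × List (List (String × String)))) (out : List (String × List (List (String × String)))) : Prop := out = organize_commits_by_author_py_alt commits_data
instance (commits_data : List (String × List (List (String × String)))) (out : List (String × List (List (String × String)))) : Decidable (Spec_organize_commits_by_author_py commits_data out) := by unfold Spec_organize_commits_by_author_py; infer_instance

-- ===== CLAIM (what is proved, stated in full; the proofs are below) =====
def Claim_equal_organize_commits_by_author_py : Prop := ∀ (commits_data : List (String × List (List (String × String)))), Dom_organize_commits_by_author_py commits_data → Pre_organize_commits_by_author_py commits_data → Spec_organize_commits_by_author_py commits_data (organize_commits_by_author_py commits_data)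

-- ===== LEMMAS AND PROOFS =====

-- A's guarded "ensure key, then append" step is one Dict.modify
lemma stepA_eq_modify (d : PySem.Dict String (List (List (String × String)))) (c : List (String × String)) :
    (let a := pvAuthor c
     let d' := if d.contains a then d else d.insert a ([] : List (List (String × String)))
     d'.modify a [] (fun l => l ++ [c])) = d.modify (pvAuthor c) [] (fun l => l ++ [c]) := by
  by_cases h : d.contains (pvAuthor c)
  · simp [h]
  · have hf : d.contains (pvAuthor c) = false := by simpa using h
    simp only [hf, Bool.false_eq_true, if_false, PySem.Dict.modify,
      PySem.Dict.getD_insert_self, PySem.Dict.insert_insert_self,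
      PySem.Dict.getD_of_not_contains d _ hf, List.nil_append]

-- nested foldl over (repo, commits) pairs = foldl over the flattened commit stream
lemma foldl_nested {α : Type} (l : List (String × List (List (String × String))))
    (step : α → List (String × String) → α) (d : α) :
    l.foldl (fun d rc => rc.2.foldl step d) d = (l.flatMap (·.2)).foldl step d := by
  induction l generalizing d with
  | nil => rfl
  | cons rc t ih => simp [List.flatMap_cons, List.foldl_append, ih]

-- B's scan-and-insert is PySem's insertBy with the reverse-sort comparator
lemma insertBy_cons {α : Type} (before : α → α → Bool) (x y : α) (t : List α) :
    PySem.List.insertBy before x (y :: t)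
      = if before x y then x :: y :: t else y :: PySem.List.insertBy before x t := by
  simp [PySem.List.insertBy]

lemma insort_eq_insertBy (c : List (String × String)) (m : List (List (String × String))) :
    pvInsortDesc (pvDate c) c m
      = PySem.List.insertBy (fun a b => decide (pvDate b < pvDate a)) c m := by
  induction m with
  | nil => rfl
  | cons x t ih =>
    rw [insertBy_cons]
    by_cases h : pvDate x < pvDate c
    · rw [if_pos (decide_eq_true h)]
      simp only [pvInsortDesc, if_neg (not_le.mpr h)]
    · rw [if_neg (by simpa using h)]
      simp only [pvInsortDesc, if_pos (not_lt.mp h), ih]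

-- appending one element and re-sorting = ordered insertion into the sorted list
lemma sorted_append_singleton (l : List (List (String × String))) (c : List (String × String)) :
    PySem.List.sorted (l ++ [c]) pvDate true
      = pvInsortDesc (pvDate c) c (PySem.List.sorted l pvDate true) := by
  rw [insort_eq_insertBy, PySem.List.sorted_rev_eq_foldl_insertBy,
    PySem.List.sorted_rev_eq_foldl_insertBy, List.foldl_append]
  rfl

-- what B's fold holds for each author: the date-descending sort of that author's commits
lemma getD_B (cs : List (List (String × String))) (k : String) :
    ((cs.foldl (fun d c =>
        d.insert (pvAuthor c) (pvInsortDesc (pvDate c) c (d.getD (pvAuthor c) []))) (PySem.Dict.empty : PySem.Dict String (List (List (String × String))))).getD k [])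
      = PySem.List.sorted (cs.filter (fun c => pvAuthor c == k)) pvDate true := by
  induction cs using List.reverseRecOn with
  | nil => rfl
  | append_singleton t c ih =>
    rw [List.foldl_append]
    by_cases h : k = pvAuthor c
    · subst h
      simp only [List.foldl_cons, List.foldl_nil, PySem.Dict.getD_insert]
      rw [ih, List.filter_append]
      simp only [List.filter_cons, List.filter_nil, beq_self_eq_true, if_pos trivial]
      rw [sorted_append_singleton]
    · simp only [List.foldl_cons, List.foldl_nil, PySem.Dict.getD_insert, if_neg h, ih,
        List.filter_append]
      have : (pvAuthor c == k) = false := by simp [Ne.symm h]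
      simp [this]

-- what A's grouping fold holds for each author: that author's commits in input order
lemma getD_grouped (cs : List (List (String × String))) (k : String) :
    ((cs.foldl (fun d c => d.modify (pvAuthor c) [] (fun l => l ++ [c])) (PySem.Dict.empty : PySem.Dict String (List (List (String × String))))).getD k [])
      = cs.filter (fun c => pvAuthor c == k) := by
  have hmap : cs.foldl (fun d c => d.modify (pvAuthor c) [] (fun l => l ++ [c])) (PySem.Dict.empty : PySem.Dict String (List (List (String × String))))
      = (cs.map (fun c => (pvAuthor c, c))).foldl (fun d p => d.modify p.1 [] (fun l => l ++ [p.2])) PySem.Dict.empty := by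
    rw [List.foldl_map]
  rw [hmap, PySem.Dict.getD_foldl_modify_append]
  simp [List.filter_map, Function.comp_def]

-- A's per-key sort phase over a duplicate-free key list, seen through getD
lemma getD_sortphase (ks : List String) (hnd : ks.Nodup)
    (d : PySem.Dict String (List (List (String × String)))) (k : String) :
    ((ks.foldl (fun d a => d.modify a [] (fun l => PySem.List.sorted l pvDate true)) d).getD k [])
      = if k ∈ ks then PySem.List.sorted (d.getD k []) pvDate true else d.getD k [] := by
  induction ks generalizing d with
  | nil => simp
  | cons a t ih =>
    simp only [List.foldl_cons]
    rw [ih (List.Nodup.of_cons hnd)]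
    rcases List.nodup_cons.mp hnd with ⟨ha, _⟩
    by_cases hk : k ∈ t
    · have hne : k ≠ a := fun e => ha (e ▸ hk)
      simp [hk, PySem.Dict.getD_modify, hne]
    · by_cases hka : k = a
      · simp [hka]
      · simp [hk, hka, PySem.Dict.getD_modify]

-- updating a set with elements it already has changes nothing
lemma set_update_self (s : PySem.Set String) (xs : List String) (h : ∀ x ∈ xs, x ∈ s) :
    PySem.Set.update s xs = s := by
  induction xs generalizing s with
  | nil => rfl
  | cons x t ih =>
    have hx : PySem.Set.add s x = s := by
      have hm : x ∈ s := h x (by simp)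
      simp [PySem.Set.add, PySem.Set.contains, hm]
    simp only [PySem.Set.update, List.foldl_cons]
    rw [show List.foldl PySem.Set.add (PySem.Set.add s x) t = PySem.Set.update (PySem.Set.add s x) t from rfl]
    rw [hx, ih s (fun y hy => h y (by simp [hy]))]

-- the main unconditional equality of the two ports
-- the two ports agree after flattening: group-then-sort items = insort-fold items
lemma dict_items_eq (cs : List (List (String × String))) :
    (((cs.foldl (fun d c => d.modify (pvAuthor c) [] (fun l => l ++ [c])) (PySem.Dict.empty : PySem.Dict String (List (List (String × String))))).keys).foldl
        (fun d a => d.modify a [] (fun l => PySem.List.sorted l pvDate true))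
        (cs.foldl (fun d c => d.modify (pvAuthor c) [] (fun l => l ++ [c])) PySem.Dict.empty)).items
      = (cs.foldl (fun d c =>
          d.insert (pvAuthor c) (pvInsortDesc (pvDate c) c (d.getD (pvAuthor c) []))) (PySem.Dict.empty : PySem.Dict String (List (List (String × String))))).items := by
  classical
  have hGkeys : (cs.foldl (fun d c => d.modify (pvAuthor c) [] (fun l => l ++ [c])) (PySem.Dict.empty : PySem.Dict String (List (List (String × String))))).keys
      = PySem.Set.ofList (cs.map pvAuthor) := by
    have h := PySem.Dict.keys_foldl_modify_key cs pvAuthor ([] : List (List (String × String)))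
      (fun _ c => (fun l => l ++ [c])) PySem.Dict.empty
    rw [h, PySem.Dict.keys_empty]
    rfl
  have hBkeys : (cs.foldl (fun d c =>
        d.insert (pvAuthor c) (pvInsortDesc (pvDate c) c (d.getD (pvAuthor c) []))) (PySem.Dict.empty : PySem.Dict String (List (List (String × String))))).keys
      = PySem.Set.ofList (cs.map pvAuthor) := by
    have h := PySem.Dict.keys_foldl_insert_key cs pvAuthor
      (fun d c => pvInsortDesc (pvDate c) c (d.getD (pvAuthor c) [])) PySem.Dict.empty
    rw [h, PySem.Dict.keys_empty]
    rfl
  have hGnodup : (cs.foldl (fun d c => d.modify (pvAuthor c) [] (fun l => l ++ [c])) (PySem.Dict.empty : PySem.Dict String (List (List (String × String))))).keys.Nodup := by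
    rw [hGkeys]; exact PySem.Set.nodup_ofList _
  have hFkeys : (((cs.foldl (fun d c => d.modify (pvAuthor c) [] (fun l => l ++ [c])) (PySem.Dict.empty : PySem.Dict String (List (List (String × String))))).keys).foldl
        (fun d a => d.modify a [] (fun l => PySem.List.sorted l pvDate true))
        (cs.foldl (fun d c => d.modify (pvAuthor c) [] (fun l => l ++ [c])) PySem.Dict.empty)).keys
      = (cs.foldl (fun d c => d.modify (pvAuthor c) [] (fun l => l ++ [c])) (PySem.Dict.empty : PySem.Dict String (List (List (String × String))))).keys := by
    have h := PySem.Dict.keys_foldl_modify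
      ((cs.foldl (fun d c => d.modify (pvAuthor c) [] (fun l => l ++ [c])) (PySem.Dict.empty : PySem.Dict String (List (List (String × String))))).keys)
      ([] : List (List (String × String)))
      (fun _ _ => (fun l => PySem.List.sorted l pvDate true))
      (cs.foldl (fun d c => d.modify (pvAuthor c) [] (fun l => l ++ [c])) PySem.Dict.empty)
    rw [h]
    exact set_update_self _ _ (fun x hx => hx)
  have hFnodup : (((cs.foldl (fun d c => d.modify (pvAuthor c) [] (fun l => l ++ [c])) (PySem.Dict.empty : PySem.Dict String (List (List (String × String))))).keys).foldl
        (fun d a => d.modify a [] (fun l => PySem.List.sorted l pvDate true))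
        (cs.foldl (fun d c => d.modify (pvAuthor c) [] (fun l => l ++ [c])) PySem.Dict.empty)).keys.Nodup := by
    rw [hFkeys]; exact hGnodup
  have hBnodup : (cs.foldl (fun d c =>
        d.insert (pvAuthor c) (pvInsortDesc (pvDate c) c (d.getD (pvAuthor c) []))) (PySem.Dict.empty : PySem.Dict String (List (List (String × String))))).keys.Nodup := by
    rw [hBkeys]; exact PySem.Set.nodup_ofList _
  rw [PySem.Dict.items_eq_map_keys _ hFnodup ([] : List (List (String × String))),
    PySem.Dict.items_eq_map_keys _ hBnodup ([] : List (List (String × String))),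
    hFkeys, hBkeys, ← hGkeys]
  refine List.map_congr_left (fun k hk => ?_)
  rw [Prod.mk.injEq]
  refine ⟨rfl, ?_⟩
  rw [getD_sortphase _ hGnodup, if_pos hk, getD_grouped, getD_B]

lemma main_eq (commits_data : List (String × List (List (String × String)))) :
    organize_commits_by_author_py commits_data = organize_commits_by_author_py_alt commits_data := by
  have hstep : (fun (d : PySem.Dict String (List (List (String × String)))) (c : List (String × String)) =>
      let a := pvAuthor c
      let d' := if d.contains a then d else d.insert a ([] : List (List (String × String)))
      d'.modify a [] (fun l => l ++ [c]))
      = (fun d c => d.modify (pvAuthor c) [] (fun l => l ++ [c])) :=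
    funext fun d => funext fun c => stepA_eq_modify d c
  unfold organize_commits_by_author_py organize_commits_by_author_py_alt
  simp only [hstep, foldl_nested]
  exact dict_items_eq (commits_data.flatMap (fun rc => rc.2))

-- ===== VERDICT (by name: the statement is the Claim_ definition above) =====
theorem organize_commits_by_author_py_spec : Claim_equal_organize_commits_by_author_py := by
  intro cd _ _
  unfold Spec_organize_commits_by_author_py
  exact main_eq cd
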